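-- pv_equiv track=rewrite | github.com/leo-zhang-93/adventOfCode | 2023/script_20231213.py | checkv
-- ===== SOURCE A (Python) =====
-- def checkv(ls, i):
--     u = i
--     d = i + 1
--     m = len(ls)
--     flag = 1
--     while u >= 0 and d < m:
--         if ls[u] != ls[d]:
--             flag = 0
--             break
--         u -= 1
--         d += 1
--     return flag
-- ===== SOURCE B (Python) =====
-- def checkv(ls, i):
--     m = len(ls)
--     k = min(i + 1, m - i - 1)
--     if k < 0:
--         k = 0
--     left = ls[i + 1 - k : i + 1]
--     right = ls[i + 1 : i + 1 + k]
--     return 1 if left[::-1] == right else 0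
-- ===== Notes on version B (the rewrite author's own statement) =====
-- stated objective: simpler
-- what changed: Replaces the two-pointer while loop with a closed-form overlap length k = clamp(min(i+1, m-i-1), 0) and a single slice comparison: reversed left slice equals right slice.
import Mathlib
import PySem

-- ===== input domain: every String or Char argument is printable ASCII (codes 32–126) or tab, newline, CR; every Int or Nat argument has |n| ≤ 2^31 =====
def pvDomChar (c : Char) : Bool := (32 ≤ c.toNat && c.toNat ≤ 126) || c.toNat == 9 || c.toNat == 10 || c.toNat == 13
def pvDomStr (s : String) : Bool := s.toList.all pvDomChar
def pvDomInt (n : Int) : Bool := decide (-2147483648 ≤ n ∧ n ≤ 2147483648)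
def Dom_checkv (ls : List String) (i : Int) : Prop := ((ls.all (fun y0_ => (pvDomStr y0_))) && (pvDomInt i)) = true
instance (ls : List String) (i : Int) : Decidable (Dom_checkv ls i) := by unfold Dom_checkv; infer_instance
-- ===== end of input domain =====

-- B replaces A's two-pointer while loop by a closed-form overlap length and one
-- slice comparison (reversed left slice = right slice); same cost, simpler code.

-- ===== PORT A =====
-- the while loop of A, step for step: state (u, d), flag=0 on mismatch (break), flag=1 on exit
def checkvLoop (ls : List String) (m : Int) (u d : Int) : Int :=
  if 0 ≤ u ∧ d < m then
    if PySem.List.pyGet? ls u ≠ PySem.List.pyGet? ls d then 0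
    else checkvLoop ls m (u - 1) (d + 1)
  else 1
termination_by (u + 1).toNat
decreasing_by omega

def checkv (ls : List String) (i : Int) : Int :=
  checkvLoop ls (ls.length : Int) i (i + 1)

-- ===== PORT B =====
def checkv_alt (ls : List String) (i : Int) : Int :=
  let m : Int := ls.length
  let k0 : Int := min (i + 1) (m - i - 1)
  let k : Int := if k0 < 0 then 0 else k0
  let left := PySem.List.slice ls (some (i + 1 - k)) (some (i + 1))
  let right := PySem.List.slice ls (some (i + 1)) (some (i + 1 + k))
  if left.reverse = right then 1 else 0

-- ===== PRECONDITION & SPEC =====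
def Spec_checkv (ls : List String) (i : Int) (out : Int) : Prop := out = checkv_alt ls i
instance (ls : List String) (i : Int) (out : Int) : Decidable (Spec_checkv ls i out) := by unfold Spec_checkv; infer_instance

-- ===== CLAIM (what is proved, stated in full; the proofs are below) =====
def Claim_equal_checkv : Prop := ∀ (ls : List String) (i : Int), Dom_checkv ls i → Spec_checkv ls i (checkv ls i)

-- ===== LEMMAS AND PROOFS =====

lemma slice_self {α : Type} (xs : List α) (a : Int) :
    PySem.List.slice xs (some a) (some a) = [] := by
  apply List.eq_nil_of_length_eq_zero
  rw [PySem.List.length_slice]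
  exact Nat.sub_self _

lemma loop_slice (ls : List String) (n : Nat) : ∀ (u d : Int), 0 ≤ d →
    (n : Int) = max 0 (min (u + 1) ((ls.length : Int) - d)) →
    (n = 0 ∨ u < (ls.length : Int)) →
    checkvLoop ls (ls.length : Int) u d =
      (if (PySem.List.slice ls (some (u + 1 - n)) (some (u + 1))).reverse
          = PySem.List.slice ls (some d) (some (d + n)) then 1 else 0) := by
  induction n with
  | zero =>
    intro u d _ hn _
    rw [checkvLoop]
    have hcond : ¬ (0 ≤ u ∧ d < (ls.length : Int)) := by omega
    rw [if_neg hcond]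
    simp [slice_self]
  | succ n ih =>
    intro u d hd hn hum
    have hum' : u < (ls.length : Int) := by omega
    have hpos : 0 < min (u + 1) ((ls.length : Int) - d) := by omega
    have hu : 0 ≤ u := by omega
    have hdm : d < (ls.length : Int) := by omega
    have hnu : (n : Int) ≤ u := by omega
    have hdn : d + (n + 1) ≤ (ls.length : Int) := by omega
    set a := u.toNat with ha
    set b := d.toNat with hb
    have hua : u = (a : Int) := by omega
    have hdb : d = (b : Int) := by omega
    have ham : a < ls.length := by omega
    have hbm : b < ls.length := by omega
    have hna : n ≤ a := by omega
    have hbnm : b + (n + 1) ≤ ls.length := by omega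
    -- rewrite slices to drop/take form
    have hL : PySem.List.slice ls (some (u + 1 - ((n : Int) + 1))) (some (u + 1))
        = (ls.drop (a - n)).take (n + 1) := by
      have h1 : u + 1 - ((n : Int) + 1) = ((a - n : Nat) : Int) := by omega
      have h2 : u + 1 = ((a + 1 : Nat) : Int) := by omega
      rw [h1, h2, PySem.List.slice_natCast]
      congr 1
      omega
    have hR : PySem.List.slice ls (some d) (some (d + ((n : Int) + 1)))
        = (ls.drop b).take (n + 1) := by
      rw [hdb, show ((b:Int) + ((n : Int) + 1)) = ((b + (n + 1) : Nat) : Int) by push_cast; ring,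
        PySem.List.slice_natCast]
      congr 1
      omega
    -- decompose the two sides
    have hLdec : (ls.drop (a - n)).take (n + 1) = (ls.drop (a - n)).take n ++ [ls[a]] := by
      rw [List.take_add_one]
      congr 1
      rw [List.getElem?_drop]
      have : a - n + n = a := by omega
      rw [this, List.getElem?_eq_getElem ham]
      rfl
    have hRdec : (ls.drop b).take (n + 1) = ls[b] :: (ls.drop (b + 1)).take n := by
      rw [List.drop_eq_getElem_cons hbm]
      rfl
    -- unfold one loop step
    rw [checkvLoop, if_pos ⟨hu, hdm⟩]
    have hg1 : PySem.List.pyGet? ls u = some ls[a] := by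
      rw [hua, PySem.List.pyGet?_natCast, List.getElem?_eq_getElem ham]
    have hg2 : PySem.List.pyGet? ls d = some ls[b] := by
      rw [hdb, PySem.List.pyGet?_natCast, List.getElem?_eq_getElem hbm]
    push_cast
    rw [hL, hR, hLdec, hRdec, List.reverse_append]
    simp only [List.reverse_cons, List.reverse_nil, List.nil_append, List.singleton_append]
    by_cases heq : ls[a] = ls[b]
    · rw [if_neg (by simp [hg1, hg2, heq])]
      have ihres := ih (u - 1) (d + 1) (by omega) (by omega) (by omega)
      rw [ihres]
      have hL' : PySem.List.slice ls (some (u - 1 + 1 - (n : Int))) (some (u - 1 + 1))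
          = (ls.drop (a - n)).take n := by
        have h1 : u - 1 + 1 - (n : Int) = ((a - n : Nat) : Int) := by omega
        have h2 : u - 1 + 1 = ((a : Nat) : Int) := by omega
        rw [h1, h2, PySem.List.slice_natCast]
        congr 1
        omega
      have hR' : PySem.List.slice ls (some (d + 1)) (some (d + 1 + (n : Int)))
          = (ls.drop (b + 1)).take n := by
        have h1 : d + 1 = ((b + 1 : Nat) : Int) := by omega
        rw [h1, show (((b + 1 : Nat) : Int) + (n : Int)) = ((b + 1 + n : Nat) : Int) by push_cast; ring,
          PySem.List.slice_natCast]
        congr 1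
        omega
      rw [hL', hR']
      simp [heq]
    · rw [if_pos (by simp [hg1, hg2, heq])]
      rw [if_neg]
      simp [heq]

lemma checkv_eq_alt (ls : List String) (i : Int) : checkv ls i = checkv_alt ls i := by
  unfold checkv checkv_alt
  dsimp only
  by_cases hd : 0 ≤ i + 1
  · set n := (max 0 (min (i + 1) ((ls.length : Int) - i - 1))).toNat with hndef
    have h1 := loop_slice ls n i (i + 1) hd (by omega) (by omega)
    rw [h1]
    have hk : (if min (i + 1) ((ls.length : Int) - i - 1) < 0 then (0 : Int)
        else min (i + 1) ((ls.length : Int) - i - 1)) = (n : Int) := by omega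
    rw [hk]
  · rw [checkvLoop, if_neg (by omega)]
    have hk : (if min (i + 1) ((ls.length : Int) - i - 1) < 0 then (0 : Int)
        else min (i + 1) ((ls.length : Int) - i - 1)) = 0 := by
      have hlt : min (i + 1) ((ls.length : Int) - i - 1) < 0 := by omega
      simp [hlt]
    rw [hk, show i + 1 - 0 = i + 1 by ring, show i + 1 + 0 = i + 1 by ring]
    simp [slice_self]

-- ===== VERDICT (by name: the statement is the Claim_ definition above) =====
theorem checkv_spec : Claim_equal_checkv := by
  intro ls i _
  unfold Spec_checkv
  exact checkv_eq_alt ls i
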